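-- pv_equiv track=rewrite | github.com/JakubWorek/introduction_to_computer_science_course | CW3/2.py | czyCyfry
-- ===== SOURCE A (Python) =====
-- def czyCyfry(l1,l2):
--     cyfry=[0 for _ in range(10)]
--
--     while(l1>0):
--         cyf=l1%10
--         cyfry[cyf]+=1
--         l1//=10
--
--     while(l2>0):
--         cyf=l2%10
--         cyfry[cyf]-=1
--         l2//=10
--
--     for i in range(10):
--         if(cyfry[i]!=0): return False
--
--     return True
-- ===== SOURCE B (Python) =====
-- def czyCyfry(l1, l2):
--     def digits(n):
--         ds = []
--         while n > 0:
--             ds.append(n % 10)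
--             n //= 10
--         ds.sort()
--         return ds
--     return digits(l1) == digits(l2)
-- ===== Notes on version B (the rewrite author's own statement) =====
-- stated objective: simpler
-- what changed: B extracts each number's digit list and compares the two sorted digit lists, instead of tallying counts into a ten-bucket array and scanning it for nonzero residuals.
import Mathlib
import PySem

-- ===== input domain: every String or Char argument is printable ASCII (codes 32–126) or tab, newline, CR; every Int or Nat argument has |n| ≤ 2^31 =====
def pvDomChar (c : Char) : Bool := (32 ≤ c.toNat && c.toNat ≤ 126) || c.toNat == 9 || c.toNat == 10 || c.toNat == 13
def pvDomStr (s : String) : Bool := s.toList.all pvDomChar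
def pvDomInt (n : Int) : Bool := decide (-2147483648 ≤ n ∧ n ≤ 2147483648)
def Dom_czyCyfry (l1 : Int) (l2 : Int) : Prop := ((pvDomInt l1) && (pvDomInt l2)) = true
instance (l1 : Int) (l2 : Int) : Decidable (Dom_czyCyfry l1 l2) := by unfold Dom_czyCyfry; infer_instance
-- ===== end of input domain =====

-- B compares the two sorted digit lists instead of tallying counts in a ten-bucket array; simpler, same cost.

-- ===== PORT A =====
-- while(l1>0): cyfry[l1%10] += 1; l1 //= 10
def czyLoop1 (l1 : Int) (cyfry : List Int) : List Int :=
  if l1 > 0 then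
    czyLoop1 (PySem.Int.floordiv l1 10)
      (PySem.List.pySetD cyfry (PySem.Int.mod l1 10)
        (PySem.List.pyGetD cyfry (PySem.Int.mod l1 10) 0 + 1))
  else cyfry
termination_by l1.toNat
decreasing_by
  rw [PySem.Int.floordiv_eq_ediv_of_pos (by norm_num)]
  omega

-- while(l2>0): cyfry[l2%10] -= 1; l2 //= 10
def czyLoop2 (l2 : Int) (cyfry : List Int) : List Int :=
  if l2 > 0 then
    czyLoop2 (PySem.Int.floordiv l2 10)
      (PySem.List.pySetD cyfry (PySem.Int.mod l2 10)
        (PySem.List.pyGetD cyfry (PySem.Int.mod l2 10) 0 - 1))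
  else cyfry
termination_by l2.toNat
decreasing_by
  rw [PySem.Int.floordiv_eq_ediv_of_pos (by norm_num)]
  omega

def czyCyfry (l1 : Int) (l2 : Int) : Bool :=
  let cyfry := List.replicate 10 (0 : Int)
  let cyfry := czyLoop1 l1 cyfry
  let cyfry := czyLoop2 l2 cyfry
  -- for i in range(10): if cyfry[i] != 0: return False   /  return True
  (PySem.List.pyRange 0 10 1).all (fun i => PySem.List.pyGetD cyfry i 0 == 0)

-- ===== PORT B =====
-- while n > 0: ds.append(n % 10); n //= 10
def digsLoopB (n : Int) (ds : List Int) : List Int :=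
  if n > 0 then
    digsLoopB (PySem.Int.floordiv n 10) (ds ++ [PySem.Int.mod n 10])
  else ds
termination_by n.toNat
decreasing_by
  rw [PySem.Int.floordiv_eq_ediv_of_pos (by norm_num)]
  omega

-- digits(n): collect n's decimal digits, then ds.sort()
def digitsB (n : Int) : List Int :=
  PySem.List.sorted (digsLoopB n []) (fun x => x) false

def czyCyfry_alt (l1 : Int) (l2 : Int) : Bool :=
  digitsB l1 == digitsB l2

-- ===== PRECONDITION & SPEC =====
def Spec_czyCyfry (l1 : Int) (l2 : Int) (out : Bool) : Prop := out = czyCyfry_alt l1 l2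
instance (l1 : Int) (l2 : Int) (out : Bool) : Decidable (Spec_czyCyfry l1 l2 out) := by unfold Spec_czyCyfry; infer_instance

-- ===== CLAIM (what is proved, stated in full; the proofs are below) =====
def Claim_equal_czyCyfry : Prop := ∀ (l1 : Int) (l2 : Int), Dom_czyCyfry l1 l2 → Spec_czyCyfry l1 l2 (czyCyfry l1 l2)

-- ===== LEMMAS AND PROOFS =====

-- proof-side digit list (head-first); both loops relate to it
def digs (n : Int) : List Int :=
  if n > 0 then PySem.Int.mod n 10 :: digs (PySem.Int.floordiv n 10) else []
termination_by n.toNat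
decreasing_by
  rw [PySem.Int.floordiv_eq_ediv_of_pos (by norm_num)]
  omega

-- defining equations of digs, used throughout
theorem digs_pos (n : Int) (h : n > 0) :
    digs n = PySem.Int.mod n 10 :: digs (PySem.Int.floordiv n 10) := by
  rw [digs]
  rw [if_pos h]

theorem digs_nonpos (n : Int) (h : ¬ n > 0) : digs n = [] := by
  rw [digs]
  rw [if_neg h]

theorem digsLoopB_eq (n : Int) (ds : List Int) : digsLoopB n ds = ds ++ digs n := by
  fun_induction digsLoopB n ds with
  | case1 n ds h ih => rw [ih, digs_pos n h]; simp
  | case2 n ds h => rw [digs_nonpos n h]; simp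

theorem digs_mem (n : Int) : ∀ d ∈ digs n, 0 ≤ d ∧ d < 10 := by
  fun_induction digs n with
  | case1 n h ih =>
    intro d hd
    rcases List.mem_cons.mp hd with rfl | hd
    · exact ⟨PySem.Int.mod_nonneg n (by norm_num), PySem.Int.mod_lt n (by norm_num)⟩
    · exact ih d hd
  | case2 n h => simp

theorem getD_set_eq (c : List Int) (m j : Nat) (v : Int) (hm : m < c.length) :
    (c.set m v).getD j 0 = if m = j then v else c.getD j 0 := by
  rcases Nat.lt_or_ge j c.length with hj | hj
  · rw [List.getD_eq_getElem _ _ (by simpa using hj), List.getElem_set,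
        List.getD_eq_getElem _ _ hj]
  · rw [List.getD_eq_default _ _ (by simpa using hj), List.getD_eq_default _ _ hj,
        if_neg (by omega)]

theorem loop1_spec (n : Int) (c : List Int) : c.length = 10 →
    (czyLoop1 n c).length = 10 ∧
    ∀ j : Nat, j < 10 →
      (czyLoop1 n c).getD j 0 = c.getD j 0 + (((digs n).count (j : Int) : Int)) := by
  fun_induction czyLoop1 n c with
  | case1 n c h ih =>
    intro hc
    have hm0 : 0 ≤ PySem.Int.mod n 10 := PySem.Int.mod_nonneg n (by norm_num)
    have hm10 : PySem.Int.mod n 10 < 10 := PySem.Int.mod_lt n (by norm_num)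
    rw [PySem.List.pySetD_of_nonneg c _ hm0] at ih ⊢
    have hlen : (c.set (PySem.Int.mod n 10).toNat
        (PySem.List.pyGetD c (PySem.Int.mod n 10) 0 + 1)).length = 10 := by
      simpa using hc
    obtain ⟨ihl, ihg⟩ := ih hlen
    refine ⟨ihl, ?_⟩
    intro j hj
    rw [ihg j hj, digs_pos n h, List.count_cons]
    have hjc : j < c.length := by omega
    rw [getD_set_eq c _ j _ (by omega)]
    simp only [beq_iff_eq]
    have hpg : PySem.List.pyGetD c (PySem.Int.mod n 10) 0
        = c.getD (PySem.Int.mod n 10).toNat 0 := by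
      rw [PySem.List.pyGetD_eq_getElem c 0 hm0 (by omega), List.getD_eq_getElem _ _ (by omega)]
    by_cases hjm : (PySem.Int.mod n 10).toNat = j
    · rw [if_pos hjm, if_pos (show PySem.Int.mod n 10 = (j : Int) by omega), hpg, hjm]
      push_cast
      ring
    · rw [if_neg hjm, if_neg (show ¬ PySem.Int.mod n 10 = (j : Int) by omega)]
      push_cast
      ring
  | case2 n c h =>
    intro hc
    refine ⟨hc, ?_⟩
    intro j hj
    rw [digs_nonpos n h]
    simp

theorem loop2_spec (n : Int) (c : List Int) : c.length = 10 →
    (czyLoop2 n c).length = 10 ∧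
    ∀ j : Nat, j < 10 →
      (czyLoop2 n c).getD j 0 = c.getD j 0 - (((digs n).count (j : Int) : Int)) := by
  fun_induction czyLoop2 n c with
  | case1 n c h ih =>
    intro hc
    have hm0 : 0 ≤ PySem.Int.mod n 10 := PySem.Int.mod_nonneg n (by norm_num)
    have hm10 : PySem.Int.mod n 10 < 10 := PySem.Int.mod_lt n (by norm_num)
    rw [PySem.List.pySetD_of_nonneg c _ hm0] at ih ⊢
    have hlen : (c.set (PySem.Int.mod n 10).toNat
        (PySem.List.pyGetD c (PySem.Int.mod n 10) 0 - 1)).length = 10 := by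
      simpa using hc
    obtain ⟨ihl, ihg⟩ := ih hlen
    refine ⟨ihl, ?_⟩
    intro j hj
    rw [ihg j hj, digs_pos n h, List.count_cons]
    have hjc : j < c.length := by omega
    rw [getD_set_eq c _ j _ (by omega)]
    simp only [beq_iff_eq]
    have hpg : PySem.List.pyGetD c (PySem.Int.mod n 10) 0
        = c.getD (PySem.Int.mod n 10).toNat 0 := by
      rw [PySem.List.pyGetD_eq_getElem c 0 hm0 (by omega), List.getD_eq_getElem _ _ (by omega)]
    by_cases hjm : (PySem.Int.mod n 10).toNat = j
    · rw [if_pos hjm, if_pos (show PySem.Int.mod n 10 = (j : Int) by omega), hpg, hjm]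
      push_cast
      ring
    · rw [if_neg hjm, if_neg (show ¬ PySem.Int.mod n 10 = (j : Int) by omega)]
      push_cast
      ring
  | case2 n c h =>
    intro hc
    refine ⟨hc, ?_⟩
    intro j hj
    rw [digs_nonpos n h]
    simp

theorem czyCyfry_iff (l1 l2 : Int) :
    czyCyfry l1 l2 = true ↔ (digs l1).Perm (digs l2) := by
  have hR : (List.replicate 10 (0 : Int)).length = 10 := by simp
  obtain ⟨h1l, h1g⟩ := loop1_spec l1 _ hR
  obtain ⟨h2l, h2g⟩ := loop2_spec l2 _ h1l
  have h0 : ∀ j : Nat, j < 10 → (List.replicate 10 (0 : Int)).getD j 0 = 0 := by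
    intro j hj
    interval_cases j <;> rfl
  have hkey : ∀ j : Nat, j < 10 →
      (czyLoop2 l2 (czyLoop1 l1 (List.replicate 10 0))).getD j 0
        = ((digs l1).count (j : Int) : Int) - ((digs l2).count (j : Int) : Int) := by
    intro j hj
    rw [h2g j hj, h1g j hj, h0 j hj]
    ring
  rw [show czyCyfry l1 l2 = (PySem.List.pyRange 0 10 1).all
      (fun i => PySem.List.pyGetD (czyLoop2 l2 (czyLoop1 l1 (List.replicate 10 0))) i 0 == 0)
      from rfl]
  rw [List.all_eq_true]
  constructor
  · intro hall
    rw [List.perm_iff_count]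
    intro a
    by_cases ha : 0 ≤ a ∧ a < 10
    · have hmem : a ∈ PySem.List.pyRange 0 10 1 :=
        PySem.List.mem_pyRange_one.mpr ⟨ha.1, ha.2⟩
      have hz := hall a hmem
      have haa : ((a.toNat : Nat) : Int) = a := by omega
      rw [← haa, PySem.List.pyGetD_natCast, beq_iff_eq] at hz
      have hk := hkey a.toNat (by omega)
      rw [haa] at hk
      omega
    · rw [List.count_eq_zero.mpr, List.count_eq_zero.mpr]
      · intro hmem
        have := digs_mem l2 a hmem
        omega
      · intro hmem
        have := digs_mem l1 a hmem
        omega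
  · intro hperm x hx
    obtain ⟨hx0, hx10⟩ := PySem.List.mem_pyRange_one.mp hx
    have hxx : ((x.toNat : Nat) : Int) = x := by omega
    rw [← hxx, PySem.List.pyGetD_natCast, beq_iff_eq]
    have hk := hkey x.toNat (by omega)
    rw [hxx] at hk
    have hc := List.perm_iff_count.mp hperm x
    omega

theorem czyCyfry_alt_iff (l1 l2 : Int) :
    czyCyfry_alt l1 l2 = true ↔ (digs l1).Perm (digs l2) := by
  unfold czyCyfry_alt digitsB
  rw [digsLoopB_eq, digsLoopB_eq, List.nil_append, List.nil_append, beq_iff_eq]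
  exact PySem.List.sorted_id_eq_sorted_id_iff_perm _ _

-- ===== VERDICT (by name: the statement is the Claim_ definition above) =====
theorem czyCyfry_spec : Claim_equal_czyCyfry := by
  intro l1 l2 _
  unfold Spec_czyCyfry
  have h1 := czyCyfry_iff l1 l2
  have h2 := czyCyfry_alt_iff l1 l2
  cases hA : czyCyfry l1 l2 <;> cases hB : czyCyfry_alt l1 l2 <;> simp_all
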